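-- pv_equiv track=rewrite | github.com/robbienn/iot | RPi.py/7seg_4digit/countdown.py | prepareNumber
-- ===== SOURCE A (Python) =====
-- def prepareNumber(number):
--
--         result = [];
--         leading = True
--         last4 = str(number)[-4:].rjust(4,'0')
--         for d in str(last4):
--             if (d == "0") and leading:
--                 result.append(0x7f)
--             else:
--                 leading = False
--                 result.append(int(d))
--         return result
-- ===== SOURCE B (Python) =====
-- def prepareNumber(number):
--     s = str(number)[-4:].rjust(4, '0')
--     stripped = s.lstrip('0')
--     return [0x7f] * (4 - len(stripped)) + [int(d) for d in stripped]
-- ===== Notes on version B (the rewrite author's own statement) =====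
-- stated objective: simpler
-- what changed: B computes the leading-zero boundary once with lstrip and builds the blank prefix and the digit suffix as two segments, instead of A's character walk with a stateful leading flag.
import Mathlib
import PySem

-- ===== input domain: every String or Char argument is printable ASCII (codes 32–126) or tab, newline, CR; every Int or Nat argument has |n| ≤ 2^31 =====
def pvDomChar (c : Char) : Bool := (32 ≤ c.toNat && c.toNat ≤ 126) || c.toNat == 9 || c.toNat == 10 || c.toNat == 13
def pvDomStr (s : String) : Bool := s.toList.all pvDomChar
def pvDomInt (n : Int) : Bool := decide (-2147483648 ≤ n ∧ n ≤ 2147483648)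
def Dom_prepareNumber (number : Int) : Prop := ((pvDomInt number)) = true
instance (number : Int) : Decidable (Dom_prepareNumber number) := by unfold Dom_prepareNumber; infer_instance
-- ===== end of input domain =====

-- B builds the blank prefix and the digit suffix as two segments (lstrip-based) instead of A's
-- stateful leading-flag walk; return values agree on all inputs where A returns (Pre_ excludes
-- the small negative numbers on which both Pythons raise ValueError on int('-')).

-- ===== PORT A =====
-- int(d) for a single decimal digit char; exact on digit chars (all chars are digits under Pre_)
def pvDigit (d : Char) : Int := (d.toNat : Int) - 48

-- s.rjust(4, '0'): exact for width 4 (left-pad with '0' when shorter than 4)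
def pvRjust4 (cs : List Char) : List Char := List.replicate (4 - cs.length) '0' ++ cs

def pvStepA (st : List Int × Bool) (d : Char) : List Int × Bool :=
  if d == '0' && st.2 then (st.1 ++ [0x7f], st.2) else (st.1 ++ [pvDigit d], false)

def prepareNumber (number : Int) : List Int :=
  let last4 := pvRjust4 (PySem.List.slice (PySem.Int.toChars number) (some (-4)) none)
  (last4.foldl pvStepA (([] : List Int), true)).1

-- ===== PORT B =====
def prepareNumber_alt (number : Int) : List Int :=
  let s := pvRjust4 (PySem.List.slice (PySem.Int.toChars number) (some (-4)) none)
  -- s.lstrip('0'): exact (drops leading '0' characters)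
  let stripped := s.dropWhile (· == '0')
  List.replicate (4 - stripped.length) 0x7f ++ stripped.map pvDigit

-- ===== PRECONDITION & SPEC =====
-- Pre_ excludes exactly the negative numbers whose '-' sign lands in the last 4 characters,
-- where both A and B raise ValueError on int('-'); A returns on every input Pre_ admits.
def Pre_prepareNumber (number : Int) : Prop := 0 ≤ number ∨ number ≤ -1000
instance (number : Int) : Decidable (Pre_prepareNumber number) := by unfold Pre_prepareNumber; infer_instance
def pvWitness_prepareNumber : Int := 42

def Spec_prepareNumber (number : Int) (out : List Int) : Prop := out = prepareNumber_alt number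
instance (number : Int) (out : List Int) : Decidable (Spec_prepareNumber number out) := by unfold Spec_prepareNumber; infer_instance

-- ===== CLAIM (what is proved, stated in full; the proofs are below) =====
def Claim_equal_prepareNumber : Prop := ∀ (number : Int), Dom_prepareNumber number → Pre_prepareNumber number → Spec_prepareNumber number (prepareNumber number)

-- ===== LEMMAS AND PROOFS =====
lemma foldA_false (l : List Char) (acc : List Int) :
    (l.foldl pvStepA (acc, false)).1 = acc ++ l.map pvDigit := by
  induction l generalizing acc with
  | nil => simp
  | cons d t ih => simp [pvStepA, ih]

lemma foldA_true (l : List Char) (acc : List Int) :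
    (l.foldl pvStepA (acc, true)).1 =
      acc ++ List.replicate (l.length - (l.dropWhile (· == '0')).length) 0x7f
          ++ (l.dropWhile (· == '0')).map pvDigit := by
  induction l generalizing acc with
  | nil => simp
  | cons d t ih =>
    by_cases hd : d = '0'
    · subst hd
      have hlen : (t.dropWhile (· == '0')).length ≤ t.length := List.length_dropWhile_le _ _
      have : t.length + 1 - (t.dropWhile (· == '0')).length
           = (t.length - (t.dropWhile (· == '0')).length) + 1 := by omega
      simp [pvStepA, ih, this, List.replicate_succ]
    · have hfold : pvStepA (acc, true) d = (acc ++ [pvDigit d], false) := by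
        simp [pvStepA, hd]
      simp [List.foldl_cons, hfold, foldA_false, hd]

lemma pvRjust4_length (cs : List Char) (h : cs.length ≤ 4) : (pvRjust4 cs).length = 4 := by
  simp [pvRjust4]; omega

lemma slice_last4_length (xs : List Char) :
    (PySem.List.slice xs (some (-4)) none).length ≤ 4 := by
  rw [PySem.List.slice_from_neg_ofNat xs 4 (by omega)]
  simp
  omega

theorem prepareNumber_eq (number : Int) : prepareNumber number = prepareNumber_alt number := by
  unfold prepareNumber prepareNumber_alt
  have h4 : (pvRjust4 (PySem.List.slice (PySem.Int.toChars number) (some (-4)) none)).length = 4 :=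
    pvRjust4_length _ (slice_last4_length _)
  rw [foldA_true, h4]
  simp

-- ===== VERDICT (by name: the statement is the Claim_ definition above) =====
theorem prepareNumber_spec : Claim_equal_prepareNumber := by
  intro number _ _
  exact prepareNumber_eq number
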